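-- pv_equiv track=rewrite | github.com/maati01/ASD | ćwiczenia/cwiczenia11/zad3BST.py | check_different_strings
-- ===== SOURCE A (Python) =====
-- class BSTNode:
--     def __init__(self):
--         self.G = None
--         self.A = None
--         self.T = None
--         self.C = None
--         self.end = False
--
-- def check_different_strings(T):
--     n = len(T)
--
--     tree = BSTNode()
--
--     for i in range(n):
--         root = tree
--         k = len(T[i])
--         for j in range(k):
--             x = T[i][j]
--             if T[i][j] == 'G' and root.G is not None:
--                 root = root.G
--                 continue
--             elif T[i][j] == 'G' and root.G is None:
--                 root.G = BSTNode()
--                 root = root.G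
--                 continue
--
--             if T[i][j] == 'A' and root.A is not None:
--                 root = root.A
--                 continue
--             elif T[i][j] == 'A' and root.A is None:
--                 root.A = BSTNode()
--                 root = root.A
--                 continue
--
--             if T[i][j] == 'T' and root.T is not None:
--                 root = root.T
--                 continue
--             elif T[i][j] == 'T' and root.T is None:
--                 root.T = BSTNode()
--                 root = root.T
--                 continue
--
--             if T[i][j] == 'C' and root.C is not None:
--                 root = root.C
--                 continue
--             elif T[i][j] == 'C' and root.C is None:
--                 root.C = BSTNode()
--                 root = root.C
--                 continue
--
--         if root.end is True:
--             return False
--         else: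
--             root.end = True
--
--     return True
-- ===== SOURCE B (Python) =====
-- def check_different_strings(T):
--     keys = sorted(''.join(c for c in s if c in 'GATC') for s in T)
--     prev = None
--     for k in keys:
--         if k == prev:
--             return False
--         prev = k
--     return True
-- ===== Notes on version B (the rewrite author's own statement) =====
-- stated objective: simpler
-- what changed: Replaces the hand-built 4-way trie with incremental insertion by computing each string's GATC-only key, sorting the keys and scanning adjacent pairs for a duplicate.
import Mathlib
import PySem

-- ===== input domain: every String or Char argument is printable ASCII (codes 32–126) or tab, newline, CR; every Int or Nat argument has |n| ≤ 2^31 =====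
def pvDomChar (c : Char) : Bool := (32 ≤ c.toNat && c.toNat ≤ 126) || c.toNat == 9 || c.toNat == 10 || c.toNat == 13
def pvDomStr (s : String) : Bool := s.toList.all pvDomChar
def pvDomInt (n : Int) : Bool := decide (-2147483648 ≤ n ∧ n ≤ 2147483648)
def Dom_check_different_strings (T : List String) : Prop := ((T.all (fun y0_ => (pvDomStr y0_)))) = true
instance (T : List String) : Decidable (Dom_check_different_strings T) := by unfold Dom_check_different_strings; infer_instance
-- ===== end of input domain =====

-- B replaces A's hand-built 4-way trie with incremental insertion by sorting the
-- GATC-filtered keys and scanning adjacent pairs for a duplicate; objective: simpler.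

-- ===== PORT A =====
-- the BSTNode trie: `missing` is Python's None, `node e g a t c` a BSTNode with end-flag e
inductive PvTrie where
  | missing : PvTrie
  | node : Bool → PvTrie → PvTrie → PvTrie → PvTrie → PvTrie
deriving DecidableEq, Repr

-- the inner `for j in range(k)` walk plus the final end-check/set for one string:
-- returns the updated tree and `ok` (true = root.end was not already set)
def pvIns : PvTrie → List Char → PvTrie × Bool
  | .missing, _ => (.missing, false)   -- unreachable: pvIns is only ever applied to nodes
  | .node e g a t c, [] => (.node true g a t c, !e)
  | .node e g a t c, x :: rest =>
    if x == 'G' then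
      let child := match g with | .missing => .node false .missing .missing .missing .missing | _ => g
      let r := pvIns child rest
      (.node e r.1 a t c, r.2)
    else if x == 'A' then
      let child := match a with | .missing => .node false .missing .missing .missing .missing | _ => a
      let r := pvIns child rest
      (.node e g r.1 t c, r.2)
    else if x == 'T' then
      let child := match t with | .missing => .node false .missing .missing .missing .missing | _ => t
      let r := pvIns child rest
      (.node e g a r.1 c, r.2)
    else if x == 'C' then
      let child := match c with | .missing => .node false .missing .missing .missing .missing | _ => c
      let r := pvIns child rest
      (.node e g a t r.1, r.2)
    else
      pvIns (.node e g a t c) rest     -- no branch fires: the character is skipped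

-- the outer `for i in range(n)` loop
def pvLoopA : PvTrie → List String → Bool
  | _, [] => true
  | tree, s :: rest =>
    let r := pvIns tree s.toList
    if r.2 then pvLoopA r.1 rest else false

def check_different_strings (T : List String) : Bool :=
  pvLoopA (.node false .missing .missing .missing .missing) T

-- ===== PORT B =====
def pvIsGATC (c : Char) : Bool := c == 'G' || c == 'A' || c == 'T' || c == 'C'

-- ''.join(c for c in s if c in 'GATC')
def pvKey (s : String) : String := String.ofList (s.toList.filter pvIsGATC)

-- the `prev = None; for k in keys: …` scan
def pvScan : Option String → List String → Bool
  | _, [] => true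
  | prev, k :: rest => if some k == prev then false else pvScan (some k) rest

def check_different_strings_alt (T : List String) : Bool :=
  pvScan none (PySem.List.sorted (T.map pvKey) (fun x => x) false)

-- ===== PRECONDITION & SPEC =====
def Spec_check_different_strings (T : List String) (out : Bool) : Prop := out = check_different_strings_alt T
instance (T : List String) (out : Bool) : Decidable (Spec_check_different_strings T out) := by unfold Spec_check_different_strings; infer_instance

-- ===== CLAIM (what is proved, stated in full; the proofs are below) =====
def Claim_equal_check_different_strings : Prop := ∀ (T : List String), Dom_check_different_strings T → Spec_check_different_strings T (check_different_strings T)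

-- ===== LEMMAS AND PROOFS =====

-- membership of a (GATC-only) key in the trie
def pvMem : PvTrie → List Char → Bool
  | .missing, _ => false
  | .node e _ _ _ _, [] => e
  | .node _ g a t c, x :: rest =>
    if x == 'G' then pvMem g rest
    else if x == 'A' then pvMem a rest
    else if x == 'T' then pvMem t rest
    else if x == 'C' then pvMem c rest
    else false

lemma pvMem_fresh (ds : List Char) :
    pvMem (.node false .missing .missing .missing .missing) ds = false := by
  cases ds with
  | nil => rfl
  | cons x r => unfold pvMem; split_ifs <;> rfl

-- pvIns only looks at the GATC characters: the rest are skipped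
lemma pvIns_skip : ∀ (cs : List Char) (e : Bool) (g a t c : PvTrie),
    pvIns (.node e g a t c) cs = pvIns (.node e g a t c) (cs.filter pvIsGATC) := by
  intro cs
  induction cs with
  | nil => intro e g a t c; rfl
  | cons x rest ih =>
    intro e g a t c
    by_cases hG : x = 'G'
    · subst hG; cases g <;> (simp [pvIns, pvIsGATC]; rw [ih]; exact ⟨rfl, rfl⟩)
    · by_cases hA : x = 'A'
      · subst hA; cases a <;> (simp [pvIns, pvIsGATC]; rw [ih]; exact ⟨rfl, rfl⟩)
      · by_cases hT : x = 'T'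
        · subst hT; cases t <;> (simp [pvIns, pvIsGATC]; rw [ih]; exact ⟨rfl, rfl⟩)
        · by_cases hC : x = 'C'
          · subst hC; cases c <;> (simp [pvIns, pvIsGATC]; rw [ih]; exact ⟨rfl, rfl⟩)
          · have hx : pvIsGATC x = false := by simp [pvIsGATC, hG, hA, hT, hC]
            simp [pvIns, hx, hG, hA, hT, hC]
            exact ih e g a t c

-- pvIns of a node is a node
lemma pvIns_fst_node : ∀ (cs : List Char) (e : Bool) (g a t c : PvTrie),
    ∃ e' g' a' t' c', (pvIns (.node e g a t c) cs).1 = .node e' g' a' t' c' := by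
  intro cs
  induction cs with
  | nil => intro e g a t c; exact ⟨true, g, a, t, c, rfl⟩
  | cons x rest ih =>
    intro e g a t c
    by_cases hG : x = 'G'
    · subst hG; simp [pvIns]
    · by_cases hA : x = 'A'
      · subst hA; simp [pvIns]
      · by_cases hT : x = 'T'
        · subst hT; simp [pvIns]
        · by_cases hC : x = 'C'
          · subst hC; simp [pvIns]
          · have h : pvIns (.node e g a t c) (x :: rest) = pvIns (.node e g a t c) rest := by
              simp [pvIns, hG, hA, hT, hC]
            rw [h]; exact ih e g a t c

-- the returned flag is the old end-flag of the key's node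
lemma pvIns_snd : ∀ (cs : List Char) (e : Bool) (g a t c : PvTrie), cs.all pvIsGATC →
    (pvIns (.node e g a t c) cs).2 = !pvMem (.node e g a t c) cs := by
  intro cs
  induction cs with
  | nil => intro e g a t c _; rfl
  | cons x rest ih =>
    intro e g a t c hall
    simp only [List.all_cons, Bool.and_eq_true] at hall
    obtain ⟨hx, hrest⟩ := hall
    by_cases hG : x = 'G'
    · subst hG
      cases g with
      | missing => simp [pvIns, pvMem, ih _ .missing .missing .missing .missing hrest, pvMem_fresh]
      | node e' g' a' t' c' => simp [pvIns, pvMem, ih _ g' a' t' c' hrest]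
    · by_cases hA : x = 'A'
      · subst hA
        cases a with
        | missing => simp [pvIns, pvMem, ih _ .missing .missing .missing .missing hrest, pvMem_fresh]
        | node e' g' a' t' c' => simp [pvIns, pvMem, ih _ g' a' t' c' hrest]
      · by_cases hT : x = 'T'
        · subst hT
          cases t with
          | missing => simp [pvIns, pvMem, ih _ .missing .missing .missing .missing hrest, pvMem_fresh]
          | node e' g' a' t' c' => simp [pvIns, pvMem, ih _ g' a' t' c' hrest]
        · by_cases hC : x = 'C'
          · subst hC
            cases c with
            | missing => simp [pvIns, pvMem, ih _ .missing .missing .missing .missing hrest, pvMem_fresh]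
            | node e' g' a' t' c' => simp [pvIns, pvMem, ih _ g' a' t' c' hrest]
          · exfalso; simp [pvIsGATC, hG, hA, hT, hC] at hx

-- inserting a key adds exactly that key to the membership predicate
lemma pvMem_pvIns : ∀ (cs : List Char), cs.all pvIsGATC → ∀ (ds : List Char) (e : Bool) (g a t c : PvTrie),
    pvMem (pvIns (.node e g a t c) cs).1 ds
      = (pvMem (.node e g a t c) ds || decide (ds = cs)) := by
  intro cs
  induction cs with
  | nil =>
    intro _ ds e g a t c
    cases ds with
    | nil => simp [pvIns, pvMem]
    | cons y dr => simp only [pvIns, pvMem]; split_ifs <;> simp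
  | cons x rest ih =>
    intro hall ds e g a t c
    simp only [List.all_cons, Bool.and_eq_true] at hall
    obtain ⟨hx, hrest⟩ := hall
    by_cases hG : x = 'G'
    · subst hG
      cases ds with
      | nil => simp [pvIns, pvMem]
      | cons y dr =>
        by_cases hy : y = 'G'
        · subst hy
          cases g with
          | missing => simp [pvIns, pvMem, ih hrest, pvMem_fresh]
          | node e' g' a' t' c' => simp [pvIns, pvMem, ih hrest]
        · simp [pvIns, pvMem, hy]
    · by_cases hA : x = 'A'
      · subst hA
        cases ds with
        | nil => simp [pvIns, pvMem]
        | cons y dr =>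
          by_cases hy : y = 'A'
          · subst hy
            cases a with
            | missing => simp [pvIns, pvMem, ih hrest, pvMem_fresh]
            | node e' g' a' t' c' => simp [pvIns, pvMem, ih hrest]
          · simp [pvIns, pvMem, hy]
      · by_cases hT : x = 'T'
        · subst hT
          cases ds with
          | nil => simp [pvIns, pvMem]
          | cons y dr =>
            by_cases hy : y = 'T'
            · subst hy
              cases t with
              | missing => simp [pvIns, pvMem, ih hrest, pvMem_fresh]
              | node e' g' a' t' c' => simp [pvIns, pvMem, ih hrest]
            · simp [pvIns, pvMem, hy]
        · by_cases hC : x = 'C'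
          · subst hC
            cases ds with
            | nil => simp [pvIns, pvMem]
            | cons y dr =>
              by_cases hy : y = 'C'
              · subst hy
                cases c with
                | missing => simp [pvIns, pvMem, ih hrest, pvMem_fresh]
                | node e' g' a' t' c' => simp [pvIns, pvMem, ih hrest]
              · simp [pvIns, pvMem, hy]
          · exfalso; simp [pvIsGATC, hG, hA, hT, hC] at hx

-- A's outer loop returns true iff the keys seen so far are pairwise new and absent from the trie
lemma pvLoopA_iff : ∀ (l : List String) (e : Bool) (g a t c : PvTrie),
    (pvLoopA (.node e g a t c) l = true ↔
      ((l.map fun s => s.toList.filter pvIsGATC).Nodup ∧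
        ∀ k ∈ l.map fun s => s.toList.filter pvIsGATC, pvMem (.node e g a t c) k = false)) := by
  intro l
  induction l with
  | nil => intro e g a t c; simp [pvLoopA]
  | cons s rest ih =>
    intro e g a t c
    have hk : (s.toList.filter pvIsGATC).all pvIsGATC := by
      simp only [List.all_eq_true]
      exact fun x hx => (List.mem_filter.mp hx).2
    simp only [pvLoopA]
    rw [pvIns_skip]
    cases hm : pvMem (.node e g a t c) (s.toList.filter pvIsGATC) with
    | true =>
      have h2 : (pvIns (.node e g a t c) (s.toList.filter pvIsGATC)).2 = false := by
        rw [pvIns_snd _ _ _ _ _ _ hk, hm]; rfl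
      simp only [h2, Bool.false_eq_true, if_false, List.map_cons]
      constructor
      · intro h; exact absurd h (by simp)
      · rintro ⟨-, h⟩
        have := h _ (List.mem_cons_self)
        rw [hm] at this; exact absurd this (by simp)
    | false =>
      have h2 : (pvIns (.node e g a t c) (s.toList.filter pvIsGATC)).2 = true := by
        rw [pvIns_snd _ _ _ _ _ _ hk, hm]; rfl
      obtain ⟨e', g', a', t', c', hnode⟩ := pvIns_fst_node (s.toList.filter pvIsGATC) e g a t c
      have hmem : ∀ k', pvMem (PvTrie.node e' g' a' t' c') k'
          = (pvMem (.node e g a t c) k' || decide (k' = s.toList.filter pvIsGATC)) := by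
        intro k'; rw [← hnode, pvMem_pvIns _ hk]
      simp only [h2, if_true, hnode, ih, List.map_cons, List.nodup_cons, hmem, hm,
        Bool.or_eq_false_iff, decide_eq_false_iff_not, List.mem_map, List.forall_mem_cons]
      aesop

-- A returns true iff the GATC-filtered keys are pairwise distinct
lemma pvA_iff (T : List String) :
    check_different_strings T = true ↔ (T.map fun s => s.toList.filter pvIsGATC).Nodup := by
  unfold check_different_strings
  rw [pvLoopA_iff]
  simp [pvMem_fresh]

-- the adjacent-pair scan of a weakly sorted list detects exactly the duplicates
lemma pvScan_some : ∀ (l : List String) (p : String), (p :: l).Pairwise (· ≤ ·) →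
    (pvScan (some p) l = true ↔ (p :: l).Nodup) := by
  intro l
  induction l with
  | nil => intro p _; simp [pvScan]
  | cons x r ih =>
    intro p h
    obtain ⟨hple, htail⟩ := List.pairwise_cons.mp h
    by_cases hxp : x = p
    · subst hxp; simp [pvScan]
    · have hni : p ∉ x :: r := by
        intro hmem
        rcases List.mem_cons.mp hmem with h1 | h2
        · exact hxp h1.symm
        · obtain ⟨hxle, -⟩ := List.pairwise_cons.mp htail
          exact hxp (le_antisymm (hxle p h2) (hple x List.mem_cons_self))
      have hstep : pvScan (some p) (x :: r) = pvScan (some x) r := by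
        simp [pvScan, hxp]
      rw [hstep, ih x htail]
      simp [List.nodup_cons, hni]

lemma pvScan_none : ∀ (l : List String), l.Pairwise (· ≤ ·) →
    (pvScan none l = true ↔ l.Nodup) := by
  intro l h
  cases l with
  | nil => simp [pvScan]
  | cons x r =>
    have hstep : pvScan none (x :: r) = pvScan (some x) r := by simp [pvScan]
    rw [hstep, pvScan_some r x h]

-- B returns true iff the GATC-filtered keys are pairwise distinct
lemma pvB_iff (T : List String) :
    check_different_strings_alt T = true ↔ (T.map fun s => s.toList.filter pvIsGATC).Nodup := by
  unfold check_different_strings_alt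
  have hpw : (PySem.List.sorted (T.map pvKey) (fun x => x) false).Pairwise (· ≤ ·) := by
    simpa using PySem.List.sorted_pairwise (T.map pvKey) (fun x => x)
  rw [pvScan_none _ hpw]
  rw [(PySem.List.sorted_perm (T.map pvKey) (fun x => x) false).nodup_iff]
  have hmap : T.map pvKey = (T.map fun s => s.toList.filter pvIsGATC).map String.ofList := by
    simp [pvKey, List.map_map, Function.comp]
  rw [hmap]
  exact List.nodup_map_iff (fun a b h => by
    have := congrArg String.toList h
    simpa [String.toList_ofList] using this)

-- ===== VERDICT (by name: the statement is the Claim_ definition above) =====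
theorem check_different_strings_spec : Claim_equal_check_different_strings := by
  intro T _
  unfold Spec_check_different_strings
  have hA := pvA_iff T
  have hB := pvB_iff T
  cases hA' : check_different_strings T <;> cases hB' : check_different_strings_alt T <;>
    simp_all
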